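-- pv_equiv track=rewrite | github.com/WLONEGI/Sol_LeWitt | backend/src/core/workflow/nodes/data_analyst.py | _normalize_failed_checks
-- ===== SOURCE A (Python) =====
-- STANDARD_FAILED_CHECKS = {
--     "worker_execution",
--     "tool_execution",
--     "schema_validation",
--     "missing_dependency",
--     "missing_research",
--     "mode_violation",
-- }
--
-- def _normalize_failed_checks(checks: object) -> list[str]:
--     if not isinstance(checks, list):
--         return []
--     normalized: list[str] = []
--     has_unknown = False
--     for item in checks:
--         if not isinstance(item, str):
--             continue
--         code = item.strip()
--         if not code:
--             continue
--         if code not in STANDARD_FAILED_CHECKS: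
--             has_unknown = True
--             continue
--         if code not in normalized:
--             normalized.append(code)
--
--     if has_unknown:
--         for code in ("worker_execution", "schema_validation"):
--             if code not in normalized:
--                 normalized.append(code)
--
--     return normalized
-- ===== SOURCE B (Python) =====
-- STANDARD_FAILED_CHECKS = {
--     "worker_execution",
--     "tool_execution",
--     "schema_validation",
--     "missing_dependency",
--     "missing_research",
--     "mode_violation",
-- }
--
-- def _normalize_failed_checks(checks: object) -> list[str]:
--     if not isinstance(checks, list):
--         return []
--     codes = [item.strip() for item in checks if isinstance(item, str)]
--     # Build the result from the FIXED standard set: keep the codes that occur,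
--     # ordered by their first-occurrence index in the input (ties impossible).
--     normalized = sorted(
--         (c for c in STANDARD_FAILED_CHECKS if c in codes),
--         key=codes.index,
--     )
--     if any(c and c not in STANDARD_FAILED_CHECKS for c in codes):
--         for code in ("worker_execution", "schema_validation"):
--             if code not in normalized:
--                 normalized.append(code)
--     return normalized
-- ===== Notes on version B (the rewrite author's own statement) =====
-- stated objective: alternative
-- what changed: Instead of A's single input scan that appends each new valid code to a growing list with a membership test, B scans the FIXED standard-code set, keeps the codes present in the stripped input, and sorts them by first-occurrence index (codes.index); the unknown-code fallback is computed by a separate any() pass.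
import Mathlib
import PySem

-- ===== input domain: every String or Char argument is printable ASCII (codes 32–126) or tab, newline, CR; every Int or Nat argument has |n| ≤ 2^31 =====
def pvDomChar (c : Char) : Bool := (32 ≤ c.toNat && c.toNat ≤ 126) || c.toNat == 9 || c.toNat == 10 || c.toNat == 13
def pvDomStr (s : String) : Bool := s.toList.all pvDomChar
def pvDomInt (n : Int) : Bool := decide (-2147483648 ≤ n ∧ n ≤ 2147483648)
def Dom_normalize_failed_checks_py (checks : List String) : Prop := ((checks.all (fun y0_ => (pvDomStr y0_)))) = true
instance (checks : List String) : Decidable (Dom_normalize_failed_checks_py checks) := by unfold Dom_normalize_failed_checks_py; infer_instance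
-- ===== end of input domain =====

-- B builds the result from the fixed standard-code set, sorting the codes present in the input by
-- their first-occurrence index, instead of A's input scan with append-if-absent; objective: alternative.

-- ===== PORT A =====
def stdFailedChecks : List String :=
  ["worker_execution", "tool_execution", "schema_validation",
   "missing_dependency", "missing_research", "mode_violation"]

def aStep (st : List String × Bool) (item : String) : List String × Bool :=
  let code := PySem.Str.strip item
  if code = "" then st
  else if code ∉ stdFailedChecks then (st.1, true)
  else if code ∈ st.1 then st
  else (st.1 ++ [code], st.2)

def normalize_failed_checks_py (checks : List String) : List String :=
  let st := checks.foldl aStep ([], false)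
  if st.2 then
    ["worker_execution", "schema_validation"].foldl
      (fun acc code => if code ∈ acc then acc else acc ++ [code]) st.1
  else st.1

-- ===== PORT B =====
-- key = codes.index c; the filter guarantees c ∈ codes, so index? is some (getD 0 is never the default)
def normalize_failed_checks_py_alt (checks : List String) : List String :=
  let codes := checks.map PySem.Str.strip
  let normalized :=
    PySem.List.sorted (stdFailedChecks.filter (fun c => decide (c ∈ codes)))
      (fun c => (PySem.List.index? codes c).getD 0) false
  if codes.any (fun c => decide (c ≠ "" ∧ c ∉ stdFailedChecks)) then
    ["worker_execution", "schema_validation"].foldl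
      (fun acc code => if code ∈ acc then acc else acc ++ [code]) normalized
  else normalized

-- ===== PRECONDITION & SPEC =====
def Spec_normalize_failed_checks_py (checks : List String) (out : List String) : Prop := out = normalize_failed_checks_py_alt checks
instance (checks : List String) (out : List String) : Decidable (Spec_normalize_failed_checks_py checks out) := by unfold Spec_normalize_failed_checks_py; infer_instance

-- ===== CLAIM (what is proved, stated in full; the proofs are below) =====
def Claim_equal_normalize_failed_checks_py : Prop := ∀ (checks : List String), Dom_normalize_failed_checks_py checks → Spec_normalize_failed_checks_py checks (normalize_failed_checks_py checks)

-- ===== LEMMAS AND PROOFS =====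

-- the list-building component of A's loop, flag-free
def gStep (acc : List String) (item : String) : List String :=
  if PySem.Str.strip item ∈ stdFailedChecks then PySem.Set.add acc (PySem.Str.strip item) else acc

def uTest (item : String) : Bool :=
  decide (PySem.Str.strip item ≠ "" ∧ PySem.Str.strip item ∉ stdFailedChecks)

lemma aStep_eq (st : List String × Bool) (item : String) :
    aStep st item = (gStep st.1 item, st.2 || uTest item) := by
  unfold aStep gStep uTest
  by_cases h0 : PySem.Str.strip item = ""
  · rw [h0]
    simp [show ("" : String) ∉ stdFailedChecks by decide]
  · by_cases h1 : PySem.Str.strip item ∈ stdFailedChecks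
    · simp only [h0, h1, not_true_eq_false, if_false, if_true,
        PySem.Set.add_eq_ite]
      split_ifs <;> simp
    · simp [h0, h1]

lemma foldl_aStep_split (l : List String) (acc : List String) (b : Bool) :
    l.foldl aStep (acc, b) = (l.foldl gStep acc, b || l.any uTest) := by
  induction l generalizing acc b with
  | nil => simp
  | cons x xs ih => simp [aStep_eq, ih, Bool.or_assoc]

lemma foldl_gStep (l : List String) (s : List String) :
    l.foldl gStep s
      = ((l.map PySem.Str.strip).filter (fun c => decide (c ∈ stdFailedChecks))).foldl
          PySem.Set.add s := by
  induction l generalizing s with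
  | nil => rfl
  | cons x xs ih =>
    by_cases h : PySem.Str.strip x ∈ stdFailedChecks <;>
      simp [gStep, h, ih]

-- first-occurrence index as a Nat
def fidx (l : List String) (c : String) : Nat := (PySem.List.index? l c).getD 0

lemma fidx_lt_length {l : List String} {c : String} (h : c ∈ l) : fidx l c < l.length := by
  obtain ⟨k, hk⟩ := Option.isSome_iff_exists.mp ((PySem.List.index?_isSome_iff l c).mpr h)
  obtain ⟨hlt, -⟩ := PySem.List.getElem_of_index?_eq_some hk
  rw [fidx, hk]; exact hlt

lemma fidx_append_of_mem {l : List String} (t : List String) {c : String} (h : c ∈ l) :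
    fidx (l ++ t) c = fidx l c := by
  rw [fidx, fidx, PySem.List.index?_append_of_mem t h]

lemma fidx_append_singleton_self {l : List String} {x : String} (h : x ∉ l) :
    fidx (l ++ [x]) x = l.length := by
  rw [fidx, PySem.List.index?_append_singleton_self l x h]; rfl

lemma fidx_cons_self (x : String) (l : List String) : fidx (x :: l) x = 0 := by
  rw [fidx, PySem.List.index?_cons_self]; rfl

lemma fidx_cons_of_ne {x a : String} (l : List String) (hne : x ≠ a) (ha : a ∈ l) :
    fidx (x :: l) a = fidx l a + 1 := by
  obtain ⟨k, hk⟩ := Option.isSome_iff_exists.mp ((PySem.List.index?_isSome_iff l a).mpr ha)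
  rw [fidx, fidx, PySem.List.index?_cons_of_ne l hne, hk]; rfl

lemma dedup_pairwise_fidx (l : List String) :
    (PySem.List.dedup l).Pairwise (fun a b => fidx l a < fidx l b) := by
  induction l using List.reverseRecOn with
  | nil => simp [PySem.List.dedup]
  | append_singleton l x ih =>
    have hded : PySem.List.dedup (l ++ [x]) = PySem.Set.add (PySem.List.dedup l) x := by
      simp [PySem.List.dedup_eq_ofList, PySem.Set.ofList_eq_foldl, List.foldl_append]
    by_cases hx : x ∈ l
    · have : PySem.Set.add (PySem.List.dedup l) x = PySem.List.dedup l := by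
        simp [hx]
      rw [hded, this]
      refine ih.imp_of_mem ?_
      intro a b hha hhb hab
      rw [fidx_append_of_mem [x] ((PySem.List.mem_dedup l a).mp hha),
          fidx_append_of_mem [x] ((PySem.List.mem_dedup l b).mp hhb)]
      exact hab
    · have : PySem.Set.add (PySem.List.dedup l) x = PySem.List.dedup l ++ [x] := by
        simp [hx]
      rw [hded, this, List.pairwise_append]
      refine ⟨ih.imp_of_mem ?_, by simp, ?_⟩
      · intro a b hha hhb hab
        rw [fidx_append_of_mem [x] ((PySem.List.mem_dedup l a).mp hha),
            fidx_append_of_mem [x] ((PySem.List.mem_dedup l b).mp hhb)]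
        exact hab
      · intro a hha b hhb
        simp only [List.mem_singleton] at hhb
        rw [hhb]
        have ha := (PySem.List.mem_dedup l a).mp hha
        rw [fidx_append_of_mem [x] ha, fidx_append_singleton_self hx]
        exact fidx_lt_length ha

lemma fidx_filter_mono (l : List String) (p : String → Bool) (a b : String)
    (ha : a ∈ l.filter p) (hb : b ∈ l.filter p)
    (h : fidx (l.filter p) a < fidx (l.filter p) b) : fidx l a < fidx l b := by
  induction l with
  | nil => simp at ha
  | cons x l ih =>
    by_cases hpx : p x
    · simp only [List.filter_cons, hpx, if_true] at ha hb h
      by_cases hax : x = a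
      · subst hax
        have hab : x ≠ b := by
          rintro rfl; rw [fidx_cons_self] at h; omega
        have hbl : b ∈ l := by
          rcases List.mem_cons.mp hb with rfl | hbf
          · exact absurd rfl hab
          · exact List.mem_of_mem_filter hbf
        rw [fidx_cons_self, fidx_cons_of_ne l hab hbl]; omega
      · by_cases hbx : x = b
        · subst hbx; rw [fidx_cons_self] at h; omega
        · have haf : a ∈ l.filter p := by
            rcases List.mem_cons.mp ha with rfl | h' 
            · exact absurd rfl hax
            · exact h'
          have hbf : b ∈ l.filter p := by
            rcases List.mem_cons.mp hb with rfl | h'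
            · exact absurd rfl hbx
            · exact h'
          rw [fidx_cons_of_ne _ hax haf, fidx_cons_of_ne _ hbx hbf] at h
          have := ih haf hbf (by omega)
          rw [fidx_cons_of_ne l hax (List.mem_of_mem_filter haf),
              fidx_cons_of_ne l hbx (List.mem_of_mem_filter hbf)]
          omega
    · simp only [List.filter_cons, hpx, if_false, Bool.false_eq_true] at ha hb h
      have hax : x ≠ a := by rintro rfl; exact hpx (List.of_mem_filter ha)
      have hbx : x ≠ b := by rintro rfl; exact hpx (List.of_mem_filter hb)
      rw [fidx_cons_of_ne l hax (List.mem_of_mem_filter ha),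
          fidx_cons_of_ne l hbx (List.mem_of_mem_filter hb)]
      have := ih ha hb h
      omega

-- the crux: A's first-occurrence dedup IS B's sort of the present standard codes by first index
lemma dedup_filter_eq_sorted (codes : List String) :
    PySem.List.dedup (codes.filter (fun c => decide (c ∈ stdFailedChecks)))
      = PySem.List.sorted (stdFailedChecks.filter (fun c => decide (c ∈ codes)))
          (fun c => fidx codes c) false := by
  refine Eq.symm ?_
  refine PySem.List.sorted_eq_of_perm_of_pairwise_lt
    (stdFailedChecks.filter (fun c => decide (c ∈ codes)))
    (PySem.List.dedup (codes.filter (fun c => decide (c ∈ stdFailedChecks))))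
    (fun c => fidx codes c) ?_ ?_
  · refine (List.perm_ext_iff_of_nodup (PySem.List.nodup_dedup _)
      (List.Nodup.filter _ (by decide : stdFailedChecks.Nodup))).mpr ?_
    intro a
    simp [List.mem_filter, and_comm]
  · refine (dedup_pairwise_fidx _).imp_of_mem ?_
    intro a b hha hhb hab
    exact fidx_filter_mono codes _ a b ((PySem.List.mem_dedup _ a).mp hha)
      ((PySem.List.mem_dedup _ b).mp hhb) hab

-- ===== VERDICT (by name: the statement is the Claim_ definition above) =====
theorem normalize_failed_checks_py_spec : Claim_equal_normalize_failed_checks_py := by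
  intro checks _
  unfold Spec_normalize_failed_checks_py normalize_failed_checks_py normalize_failed_checks_py_alt
  rw [foldl_aStep_split, foldl_gStep]
  have hkey : (fun c => (PySem.List.index? (checks.map PySem.Str.strip) c).getD 0)
      = fun c => fidx (checks.map PySem.Str.strip) c := rfl
  simp only [hkey, ← dedup_filter_eq_sorted, PySem.List.dedup_eq_ofList,
    PySem.Set.ofList_eq_foldl, List.any_map, Bool.false_or]
  simp [uTest, Function.comp_def]
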